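-- pv_equiv track=rewrite | github.com/whdgusdl48/Programmers_Algorithm | Level2/solution_2021_03_18.py | solution
-- ===== SOURCE A (Python) =====
-- def solution(n, t, m, p):
--     number = m
--     answer = ''
--     total_length = t * m
--     i = 1
--     c = '0'
--     temp = []
--     while len(c) < total_length:
--         test = i
--         while test != 0:
--             s = test // n
--             m = test % n
--             if m == 10:
--                 m = 'A'
--             elif m == 11:
--                 m = 'B'
--             elif m == 12:
--                 m = 'C'
--             elif m == 13:
--                 m = 'D'
--             elif m == 14:
--                 m = 'E'
--             elif m == 15:
--                 m = 'F'
--             temp.append(str(m))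
--             test = test // n
--         temp.reverse()
--         g = "".join(temp)
--         temp = []
--         c += g
--         i += 1
--     c = c[:total_length]
--     for j in range(p-1,len(c),number):
--         answer += str(c[j])
--     return answer
-- ===== SOURCE B (Python) =====
-- def to_base(v, n):
--     if v == 0:
--         return '0'
--     ds = []
--     while v != 0:
--         d = v % n
--         ds.append("0123456789ABCDEF"[d] if d < 16 else str(d))
--         v = v // n
--     return ''.join(reversed(ds))
--
--
-- def solution(n, t, m, p):
--     total = t * m
--     targets = list(range(p - 1, max(total, 0), m))
--     out = []
--     ti = 0
--     offset = 0
--     k = 0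
--     while ti < len(targets):
--         g = to_base(k, n)
--         end = offset + len(g)
--         while ti < len(targets) and targets[ti] < end:
--             out.append(g[targets[ti] - offset])
--             ti += 1
--         offset = end
--         k += 1
--     return ''.join(out)
-- ===== Notes on version B (the rewrite author's own statement) =====
-- stated objective: alternative
-- what changed: B precomputes the selected indices (p-1, p-1+m, ...) and streams the number sequence segment by segment with a running character offset, reading only the selected characters, instead of materialising the whole t*m-character string by repeated string concatenation and then truncating and indexing it.
-- outside the precondition, e.g. on solution(-2, 2, 2, 1): A returns '01', B returns '0F'; on solution(2, -1, -1, 1): A returns '', B returns ''; on solution(2, 3, 2, 0): A returns '1101', B returns '0101'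
import Mathlib
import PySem

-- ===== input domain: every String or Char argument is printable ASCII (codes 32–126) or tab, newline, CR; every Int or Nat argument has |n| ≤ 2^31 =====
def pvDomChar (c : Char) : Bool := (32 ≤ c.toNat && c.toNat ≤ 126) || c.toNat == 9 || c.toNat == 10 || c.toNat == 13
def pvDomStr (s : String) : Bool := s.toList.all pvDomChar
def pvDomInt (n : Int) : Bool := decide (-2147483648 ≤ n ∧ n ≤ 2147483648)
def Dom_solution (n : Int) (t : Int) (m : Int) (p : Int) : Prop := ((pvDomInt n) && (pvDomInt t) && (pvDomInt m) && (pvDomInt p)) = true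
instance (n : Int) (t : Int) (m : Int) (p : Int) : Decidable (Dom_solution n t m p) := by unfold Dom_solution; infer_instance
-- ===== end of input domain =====

-- B streams the concatenated number sequence segment by segment, reading only the selected characters, instead of
-- materialising the whole string and truncating it (objective: alternative decomposition).

-- ===== PORT A =====
-- str(m) after the if/elif chain: 'A'..'F' for 10..15, otherwise str of the int (exact: PySem.Int.toChars)
def pyDigitA (d : Int) : List Char :=
  if d = 10 then ['A']
  else if d = 11 then ['B']
  else if d = 12 then ['C']
  else if d = 13 then ['D']
  else if d = 14 then ['E']
  else if d = 15 then ['F']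
  else PySem.Int.toChars d

-- inner 'while test != 0' loop; fuel makes it total (i.toNat steps suffice on the admitted inputs)
def innerA (fuel : Nat) (test n : Int) (temp : List (List Char)) : List (List Char) :=
  match fuel with
  | 0 => temp
  | f + 1 =>
    if test ≠ 0 then
      innerA f (PySem.Int.floordiv test n) n (temp ++ [pyDigitA (PySem.Int.mod test n)])
    else temp

-- temp.reverse(); g = "".join(temp)
def gA (i n : Int) : List Char := ((innerA i.toNat i n []).reverse).flatten

-- outer 'while len(c) < total_length' loop; fuel total.toNat + 1 suffices (each appended g is nonempty for n ≥ 2).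
-- c is kept as Array Char so that Python's amortised-O(1) 'c += g' stays linear here; the appended values are the same.
def buildA (fuel : Nat) (n total : Int) (i : Int) (c : Array Char) : Array Char :=
  match fuel with
  | 0 => c
  | f + 1 =>
    if (c.size : Int) < total then buildA f n total (i + 1) (c ++ (gA i n).toArray) else c

-- c[:b] on an Array, exact Python slice semantics (hand-ported: negative bound counts from the end, clamped)
def arrTruncate (a : Array Char) (b : Int) : Array Char :=
  a.extract 0 (if b < 0 then ((a.size : Int) + b).toNat else b.toNat)

-- c[j] with a default, exact Python index semantics on the in-range side (hand-ported, O(1) on an Array)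
def arrGetD (a : Array Char) (i : Int) (d : Char) : Char :=
  if 0 ≤ i ∧ i < (a.size : Int) then a.getD i.toNat d
  else if -(a.size : Int) ≤ i ∧ i < 0 then a.getD (i + (a.size : Int)).toNat d
  else d

def solution (n : Int) (t : Int) (m : Int) (p : Int) : String :=
  let number := m
  let total := t * m
  let c := buildA (total.toNat + 1) n total 1 #['0']
  let c := arrTruncate c total
  let answer := (PySem.List.pyRange (p - 1) (c.size : Int) number).foldl
    (fun acc j => acc ++ [arrGetD c j '?']) ([] : List Char)
  String.ofList answer

-- ===== PORT B =====
-- "0123456789ABCDEF"[d] if d < 16 else str(d)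
def digitB (d : Int) : List Char :=
  if d < 16 then [PySem.List.pyGetD "0123456789ABCDEF".toList d '?']
  else PySem.Int.toChars d

def innerB (fuel : Nat) (v n : Int) (ds : List (List Char)) : List (List Char) :=
  match fuel with
  | 0 => ds
  | f + 1 =>
    if v ≠ 0 then
      innerB f (PySem.Int.floordiv v n) n (ds ++ [digitB (PySem.Int.mod v n)])
    else ds

-- ''.join(reversed(ds))
def toBaseB (v n : Int) : List Char :=
  if v = 0 then ['0'] else ((innerB v.toNat v n []).reverse).flatten

-- outer while of Source B; the inner while consumes the maximal prefix of the remaining targets below `end`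
def streamB (fuel : Nat) (n : Int) (targets : List Int) (offset k : Int) (out : List Char) : List Char :=
  match fuel, targets with
  | 0, _ => out
  | _ + 1, [] => out
  | f + 1, a :: ts =>
    let g := toBaseB k n
    let endo := offset + (g.length : Int)
    let pre := (a :: ts).takeWhile (fun j => decide (j < endo))
    let rest := (a :: ts).dropWhile (fun j => decide (j < endo))
    streamB f n rest endo (k + 1) (out ++ pre.map (fun j => PySem.List.pyGetD g (j - offset) '?'))

def solution_alt (n : Int) (t : Int) (m : Int) (p : Int) : String :=
  let total := t * m
  let targets := PySem.List.pyRange (p - 1) (max total 0) m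
  String.ofList (streamB (total.toNat + 1) n targets 0 0 [])

-- ===== PRECONDITION & SPEC =====
-- Pre_ restricts to the problem's natural domain: bases n ≤ 1 are admitted only while t*m ≤ 0, i.e. while no digit is
-- ever generated (once digits are needed, A diverges at n = 1, raises ZeroDivisionError at n = 0, and for negative bases
-- emits '-'-signed pseudo-digit strings that are an accident of its digit loop); m ≤ 0 is excluded (the selection step
-- is m, so m = 0 raises ValueError and a negative m raises IndexError whenever it selects anything); p ≤ 0 is excluded
-- (the selection then starts at a negative index, and A's negative-index wraparound on the whole string vs B's within a
-- segment are both accidental on this unspecified corner).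
def Pre_solution (n : Int) (t : Int) (m : Int) (p : Int) : Prop := 1 ≤ m ∧ 1 ≤ p ∧ (2 ≤ n ∨ t * m ≤ 0)
instance (n : Int) (t : Int) (m : Int) (p : Int) : Decidable (Pre_solution n t m p) := by unfold Pre_solution; infer_instance
def pvWitness_solution : Int × Int × Int × Int := (2, 4, 2, 1)

def Spec_solution (n : Int) (t : Int) (m : Int) (p : Int) (out : String) : Prop := out = solution_alt n t m p
instance (n : Int) (t : Int) (m : Int) (p : Int) (out : String) : Decidable (Spec_solution n t m p out) := by unfold Spec_solution; infer_instance

-- ===== CLAIM (what is proved, stated in full; the proofs are below) =====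
def Claim_equal_solution : Prop := ∀ (n : Int) (t : Int) (m : Int) (p : Int), Dom_solution n t m p → Pre_solution n t m p → Spec_solution n t m p (solution n t m p)

-- ===== LEMMAS AND PROOFS =====

-- segment k of the conceptual infinite string '0' + base-n(1) + base-n(2) + …
def segN (n : Int) (k : Nat) : List Char := toBaseB (k : Int) n

-- its concatenation over the first j segments
def CC (n : Int) (j : Nat) : List Char := (List.range j).flatMap (segN n)

-- the character at global index i (read from the first concatenation long enough to contain it)
def getCC (n : Int) (i : Int) : Char := PySem.List.pyGetD (CC n (i.toNat + 1)) i '?'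

theorem digitA_eq_digitB (d : Int) (hd : 0 ≤ d) : pyDigitA d = digitB d := by
  by_cases h : d < 16
  · interval_cases d <;> decide
  · unfold pyDigitA digitB
    rw [if_neg (by omega), if_neg (by omega), if_neg (by omega), if_neg (by omega),
      if_neg (by omega), if_neg (by omega), if_neg h]

theorem innerA_eq_innerB (n : Int) (hn : 2 ≤ n) :
    ∀ (fuel : Nat) (v : Int) (acc : List (List Char)), innerA fuel v n acc = innerB fuel v n acc := by
  intro fuel
  induction fuel with
  | zero => intro v acc; rfl
  | succ f ih =>
    intro v acc
    unfold innerA innerB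
    by_cases hv : v ≠ 0
    · rw [if_pos hv, if_pos hv, digitA_eq_digitB _ (PySem.Int.mod_nonneg v (by omega)), ih]
    · rw [if_neg hv, if_neg hv]

theorem gA_eq_segN (n : Int) (hn : 2 ≤ n) (j : Nat) (hj : 1 ≤ j) : gA (j : Int) n = segN n j := by
  unfold gA segN toBaseB
  rw [if_neg (by exact_mod_cast Nat.one_le_iff_ne_zero.mp hj), innerA_eq_innerB n hn]

-- str(n) is never empty (general fact about core's Nat.toDigits, not found under a library name)
theorem toDigits_ne_nil (b v : Nat) : Nat.toDigits b v ≠ [] := by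
  have hlen : ∀ (fuel w : Nat) (ds : List Char), ds.length ≤ (Nat.toDigitsCore b fuel w ds).length := by
    intro fuel
    induction fuel with
    | zero => intro w ds; simp [Nat.toDigitsCore]
    | succ f ih =>
      intro w ds
      simp only [Nat.toDigitsCore]
      by_cases h : w / b = 0
      · rw [if_pos h]; simp
      · rw [if_neg h]
        have := ih (w / b) (Nat.digitChar (w % b) :: ds)
        simp at this ⊢
        omega
  unfold Nat.toDigits
  simp only [Nat.toDigitsCore]
  by_cases h : v / b = 0
  · rw [if_pos h]; simp
  · rw [if_neg h]
    have := hlen v (v / b) [Nat.digitChar (v % b)]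
    intro hc
    rw [hc] at this
    simp at this

theorem digitB_ne_nil (d : Int) (_hd : 0 ≤ d) : digitB d ≠ [] := by
  unfold digitB
  by_cases h : d < 16
  · simp [h]
  · rw [if_neg h]
    unfold PySem.Int.toChars
    rw [if_neg (by omega)]
    exact toDigits_ne_nil 10 d.toNat

theorem innerB_prefix (n : Int) :
    ∀ (fuel : Nat) (v : Int) (acc : List (List Char)), acc <+: innerB fuel v n acc := by
  intro fuel
  induction fuel with
  | zero => intro v acc; exact List.prefix_rfl
  | succ f ih =>
    intro v acc
    unfold innerB
    by_cases hv : v ≠ 0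
    · rw [if_pos hv]
      exact (List.prefix_append acc _).trans (ih _ _)
    · rw [if_neg hv]

theorem segN_ne_nil (n : Int) (hn : 2 ≤ n) (k : Nat) : segN n k ≠ [] := by
  cases k with
  | zero => simp [segN, toBaseB]
  | succ k' =>
    unfold segN toBaseB
    rw [if_neg (by exact_mod_cast Nat.succ_ne_zero k')]
    have htn : (((k' + 1 : Nat) : Int)).toNat = k' + 1 := Int.toNat_natCast _
    rw [htn]
    have h1 : innerB (k' + 1) ((k' + 1 : Nat) : Int) n []
        = innerB k' (PySem.Int.floordiv ((k' + 1 : Nat) : Int) n) n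
            [digitB (PySem.Int.mod ((k' + 1 : Nat) : Int) n)] := by
      simp only [innerB]
      rw [if_pos (by exact_mod_cast Nat.succ_ne_zero k')]
      rw [List.nil_append]
    rw [h1]
    have hmem : digitB (PySem.Int.mod ((k' + 1 : Nat) : Int) n)
        ∈ innerB k' (PySem.Int.floordiv ((k' + 1 : Nat) : Int) n) n
            [digitB (PySem.Int.mod ((k' + 1 : Nat) : Int) n)] :=
      (innerB_prefix n k' _ _).subset (by simp)
    intro hcontra
    rw [List.flatten_eq_nil_iff] at hcontra
    exact digitB_ne_nil _ (PySem.Int.mod_nonneg _ (by omega))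
      (hcontra _ (List.mem_reverse.mpr hmem))

theorem CC_zero (n : Int) : CC n 0 = [] := rfl

theorem CC_one (n : Int) : CC n 1 = ['0'] := by
  simp [CC, List.range_one, segN, toBaseB]

theorem CC_succ (n : Int) (j : Nat) : CC n (j + 1) = CC n j ++ segN n j := by
  simp [CC, List.range_succ]

theorem CC_prefix (n : Int) {j j' : Nat} (h : j ≤ j') : CC n j <+: CC n j' := by
  induction j', h using Nat.le_induction with
  | base => exact List.prefix_rfl
  | succ j' hj ih => rw [CC_succ]; exact ih.trans (List.prefix_append _ _)

theorem le_length_CC (n : Int) (hn : 2 ≤ n) (j : Nat) : j ≤ (CC n j).length := by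
  induction j with
  | zero => simp
  | succ j ih =>
    rw [CC_succ, List.length_append]
    have := List.length_pos_of_ne_nil (segN_ne_nil n hn j)
    omega

-- a character of any sufficiently long concatenation is getCC
theorem pyGetD_CC_eq_getCC (n : Int) (hn : 2 ≤ n) (j : Nat) (i : Int)
    (h0 : 0 ≤ i) (hi : i < ((CC n j).length : Int)) :
    PySem.List.pyGetD (CC n j) i '?' = getCC n i := by
  have hij : i.toNat < (CC n j).length := by omega
  have hlen2 : i.toNat < (CC n (i.toNat + 1)).length :=
    lt_of_lt_of_le (Nat.lt_succ_self _) (le_length_CC n hn _)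
  rw [PySem.List.pyGetD_eq_getElem _ _ h0 hi, getCC,
    PySem.List.pyGetD_eq_getElem _ _ h0 (by omega)]
  rcases le_total j (i.toNat + 1) with h | h
  · exact (CC_prefix n h).getElem hij
  · exact ((CC_prefix n h).getElem hlen2).symm

-- list-level twin of A's build loop, used by the proofs
def buildAList (fuel : Nat) (n total : Int) (i : Int) (c : List Char) : List Char :=
  match fuel with
  | 0 => c
  | f + 1 =>
    if (c.length : Int) < total then buildAList f n total (i + 1) (c ++ gA i n) else c

theorem buildA_toList (n total : Int) :
    ∀ (fuel : Nat) (i : Int) (c : Array Char),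
      (buildA fuel n total i c).toList = buildAList fuel n total i c.toList := by
  intro fuel
  induction fuel with
  | zero => intro i c; rfl
  | succ f ih =>
    intro i c
    unfold buildA buildAList
    rw [show ((c.size : Int)) = ((c.toList.length : Nat) : Int) from by rw [Array.length_toList]]
    by_cases h : ((c.toList.length : Nat) : Int) < total
    · rw [if_pos h, if_pos h, ih]
      congr 1
      simp
    · rw [if_neg h, if_neg h]

theorem arrGetD_eq_pyGetD (a : Array Char) (i : Int) (d : Char)
    (h0 : 0 ≤ i) (hi : i < (a.size : Int)) :
    arrGetD a i d = PySem.List.pyGetD a.toList i d := by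
  unfold arrGetD
  rw [if_pos ⟨h0, hi⟩]
  rw [PySem.List.pyGetD_eq_getElem _ _ h0 (by rw [Array.length_toList]; exact_mod_cast hi)]
  rw [Array.getD_eq_getD_getElem?]
  rw [Array.getElem?_eq_getElem (by omega)]
  simp [Array.getElem_toList]

-- A's build loop produces a full concatenation of length ≥ total
theorem buildA_spec (n total : Int) (hn : 2 ≤ n) :
    ∀ (fuel : Nat) (j : Nat), 1 ≤ j → total ≤ ((CC n j).length : Int) + fuel →
      ∃ J : Nat, buildAList fuel n total (j : Int) (CC n j) = CC n J ∧ total ≤ ((CC n J).length : Int) := by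
  intro fuel
  induction fuel with
  | zero =>
    intro j hj h
    exact ⟨j, rfl, by exact_mod_cast h⟩
  | succ f ih =>
    intro j hj h
    unfold buildAList
    by_cases hlt : ((CC n j).length : Int) < total
    · rw [if_pos hlt, gA_eq_segN n hn j hj, ← CC_succ]
      have hlen : (CC n j).length + 1 ≤ (CC n (j + 1)).length := by
        rw [CC_succ, List.length_append]
        have := List.length_pos_of_ne_nil (segN_ne_nil n hn j)
        omega
      have := ih (j + 1) (by omega) (by push_cast at h; omega)
      rw [show ((j : Int) + 1) = ((j + 1 : Nat) : Int) by push_cast; ring]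
      exact this
    · rw [if_neg hlt]
      exact ⟨j, rfl, by omega⟩

theorem sorted_dropWhile_ge (e : Int) :
    ∀ (ts : List Int), ts.Pairwise (· < ·) →
      ∀ j ∈ ts.dropWhile (fun j => decide (j < e)), e ≤ j := by
  intro ts
  induction ts with
  | nil => simp
  | cons a ts ih =>
    intro hp j hj
    rw [List.dropWhile_cons] at hj
    by_cases ha : a < e
    · simp only [ha, decide_true, if_true] at hj
      exact ih (List.Pairwise.of_cons hp) j hj
    · simp only [ha, decide_false] at hj
      rcases List.mem_cons.mp hj with rfl | hj
      · omega
      · have := (List.pairwise_cons.mp hp).1 j hj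
        omega

-- B's streaming loop returns the selected characters of the conceptual string
theorem streamB_spec (n : Int) (hn : 2 ≤ n) :
    ∀ (fuel : Nat) (k : Nat) (ts : List Int) (out : List Char),
      ts.Pairwise (· < ·) →
      (∀ j ∈ ts, ((CC n k).length : Int) ≤ j) →
      (∀ j ∈ ts, j < ((CC n (k + fuel)).length : Int)) →
      streamB fuel n ts ((CC n k).length : Int) (k : Int) out = out ++ ts.map (getCC n) := by
  intro fuel
  induction fuel with
  | zero =>
    intro k ts out hp hlo hhi
    have hts : ts = [] := by
      cases ts with
      | nil => rfl
      | cons a ts =>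
        have h1 := hlo a (by simp)
        have h2 := hhi a (by simp)
        rw [Nat.add_zero] at h2
        omega
    subst hts
    simp [streamB]
  | succ f ih =>
    intro k ts out hp hlo hhi
    cases ts with
    | nil => simp [streamB]
    | cons a ts' =>
      rw [streamB]
      have hgseg : toBaseB (k : Int) n = segN n k := rfl
      have hend : ((CC n k).length : Int) + ((toBaseB (k : Int) n).length : Int)
          = ((CC n (k + 1)).length : Int) := by
        rw [hgseg, CC_succ n k, List.length_append]
        push_cast
        ring
      set endo := ((CC n k).length : Int) + ((toBaseB (k : Int) n).length : Int) with hendo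
      set pre := (a :: ts').takeWhile (fun j => decide (j < endo)) with hpre
      set rest := (a :: ts').dropWhile (fun j => decide (j < endo)) with hrest
      have hchar : ∀ j ∈ pre,
          PySem.List.pyGetD (toBaseB (k : Int) n) (j - ((CC n k).length : Int)) '?' = getCC n j := by
        intro j hj
        rw [hpre] at hj
        have hjw : decide (j < endo) = true :=
          List.mem_takeWhile_imp (p := fun j => decide (j < endo)) (l := a :: ts') hj
        have hjlt : j < ((CC n (k + 1)).length : Int) := by
          rw [← hend]
          simpa [hendo] using of_decide_eq_true hjw
        have hjmem : j ∈ a :: ts' := (List.takeWhile_sublist _).subset hj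
        rw [← hpre] at hj
        have hjlo := hlo j hjmem
        have h0 : (0 : Int) ≤ j - ((CC n k).length : Int) := by omega
        have hlt' : j - ((CC n k).length : Int) < ((toBaseB (k : Int) n).length : Int) := by
          rw [← hend] at hjlt; omega
        rw [PySem.List.pyGetD_eq_getElem _ _ h0 hlt']
        rw [← pyGetD_CC_eq_getCC n hn (k + 1) j (by omega) hjlt]
        rw [PySem.List.pyGetD_eq_getElem _ _ (by omega) hjlt]
        have hb1 : (j - ((CC n k).length : Int)).toNat < (toBaseB ((k : Nat) : Int) n).length := by
          omega
        have hb2 : j.toNat < (CC n (k + 1)).length := by omega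
        have h1 : (CC n (k + 1))[j.toNat]?
            = (toBaseB ((k : Nat) : Int) n)[(j - ((CC n k).length : Int)).toNat]? := by
          conv_lhs => rw [CC_succ]
          rw [List.getElem?_append_right (by omega)]
          simp only [segN]
          congr 1
          omega
        rw [List.getElem?_eq_getElem hb2, List.getElem?_eq_getElem hb1] at h1
        exact (Option.some.inj h1).symm
      have hrest_pair : rest.Pairwise (· < ·) := hp.sublist (List.dropWhile_sublist _)
      have hrest_lo : ∀ j ∈ rest, ((CC n (k + 1)).length : Int) ≤ j := by
        intro j hj
        have := sorted_dropWhile_ge endo (a :: ts') hp j hj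
        omega
      have hrest_hi : ∀ j ∈ rest, j < ((CC n ((k + 1) + f)).length : Int) := by
        intro j hj
        have := hhi j ((List.dropWhile_sublist _).subset hj)
        rw [show k + (f + 1) = (k + 1) + f from by omega] at this
        exact this
      have hrec := ih (k + 1) rest (out ++ pre.map (fun j => PySem.List.pyGetD (toBaseB (k : Int) n) (j - ((CC n k).length : Int)) '?'))
        hrest_pair hrest_lo hrest_hi
      rw [show ((CC n (k + 1)).length : Int) = endo from hend.symm] at hrec
      rw [show (((k + 1 : Nat)) : Int) = (k : Int) + 1 from by push_cast; ring] at hrec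
      rw [hrec]
      rw [List.map_congr_left hchar]
      rw [List.append_assoc]
      congr 1
      rw [← List.map_append]
      congr 1
      exact List.takeWhile_append_dropWhile

-- pyRange with positive step is strictly increasing
theorem pairwise_lt_pyRange_pos (a b s : Int) (hs : 0 < s) :
    (PySem.List.pyRange a b s).Pairwise (· < ·) := by
  rw [PySem.List.pyRange_of_pos a b hs]
  rw [List.pairwise_map]
  refine List.pairwise_lt_range.imp ?_
  intro x y hxy
  have hc : (x : Int) < (y : Int) := by exact_mod_cast hxy
  have h2 := mul_lt_mul_of_pos_left hc hs
  linarith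

-- ===== VERDICT (by name: the statement is the Claim_ definition above) =====
theorem solution_spec : Claim_equal_solution := by
  intro n t m p hdom hpre
  obtain ⟨hm, hp, hdisj⟩ := hpre
  unfold Spec_solution solution solution_alt
  simp only []
  set total := t * m with htotal
  by_cases htot : total ≤ 0
  · -- degenerate: the truncated string is empty and no index is selected
    have htn : total.toNat = 0 := by omega
    have hbuild : buildA (total.toNat + 1) n total 1 #['0'] = #['0'] := by
      rw [htn]
      unfold buildA
      rw [if_neg (by simp; omega)]
    rw [hbuild]
    have htr : (arrTruncate #['0'] total).size = 0 := by
      unfold arrTruncate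
      rw [show (if total < 0 then ((((#['0'] : Array Char).size : Int)) + total).toNat else total.toNat) = 0
        from by split_ifs <;> simp <;> omega]
      simp
    have hr0 : PySem.List.pyRange (p - 1) ((arrTruncate #['0'] total).size : Int) m = [] := by
      rw [htr]
      rw [PySem.List.pyRange_of_pos _ _ (by omega : (0 : Int) < m), if_neg (by omega)]
      simp
    rw [hr0]
    have hmax0 : max total 0 = 0 := by omega
    rw [hmax0]
    have hrB : PySem.List.pyRange (p - 1) 0 m = [] := by
      rw [PySem.List.pyRange_of_pos _ _ (by omega : (0 : Int) < m), if_neg (by omega)]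
      simp
    rw [hrB, htn]
    simp [streamB]
  · -- main case: 1 ≤ total (so the base really is ≥ 2)
    have hn : 2 ≤ n := hdisj.resolve_right htot
    have htot1 : (1 : Int) ≤ total := by omega
    obtain ⟨J, hbuild, hlen⟩ := buildA_spec n total hn (total.toNat + 1) 1 (by omega)
      (by rw [CC_one]; simp; omega)
    set carr := buildA (total.toNat + 1) n total 1 #['0'] with hcarr
    have hA : carr.toList = CC n J := by
      rw [hcarr, buildA_toList]
      rw [show (#['0'] : Array Char).toList = CC n 1 from by rw [CC_one],
        show (1 : Int) = ((1 : Nat) : Int) from rfl]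
      exact hbuild
    set ctr := arrTruncate carr total with hctrdef
    have hctr : ctr.toList = (CC n J).take total.toNat := by
      rw [hctrdef]
      unfold arrTruncate
      rw [show (if total < 0 then ((carr.size : Int) + total).toNat else total.toNat) = total.toNat
        from by rw [if_neg (by omega)]]
      rw [← hA]
      simp [Array.toList_extract]
    have hlentake : ((CC n J).take total.toNat).length = total.toNat := by
      rw [List.length_take]
      omega
    have hsize : (ctr.size : Int) = total := by
      rw [← Array.length_toList, hctr, hlentake]
      omega
    rw [hsize]
    rw [PySem.List.foldl_append_singleton_eq_map
      (fun j => arrGetD ctr j '?')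
      (PySem.List.pyRange (p - 1) total m) []]
    rw [List.nil_append]
    have hmapA : ∀ j ∈ PySem.List.pyRange (p - 1) total m,
        arrGetD ctr j '?' = getCC n j := by
      intro j hj
      rw [PySem.List.mem_pyRange_iff_of_pos (by omega : (0 : Int) < m)] at hj
      obtain ⟨hj1, hj2, -⟩ := hj
      have h0j : (0 : Int) ≤ j := by omega
      have hjlen : j < (((CC n J).take total.toNat).length : Int) := by
        rw [hlentake]; omega
      rw [arrGetD_eq_pyGetD _ _ _ h0j (by rw [hsize]; omega), hctr]
      rw [PySem.List.pyGetD_eq_getElem _ _ h0j hjlen]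
      rw [← pyGetD_CC_eq_getCC n hn J j h0j (by omega)]
      rw [PySem.List.pyGetD_eq_getElem _ _ h0j (by omega)]
      exact List.getElem_take
    rw [List.map_congr_left hmapA]
    have hmax : max total 0 = total := by omega
    rw [hmax]
    have hB := streamB_spec n hn (total.toNat + 1) 0 (PySem.List.pyRange (p - 1) total m) []
      (pairwise_lt_pyRange_pos _ _ _ (by omega))
      (by intro j hj
          rw [PySem.List.mem_pyRange_iff_of_pos (by omega : (0 : Int) < m)] at hj
          simp [CC_zero]
          omega)
      (by intro j hj
          rw [PySem.List.mem_pyRange_iff_of_pos (by omega : (0 : Int) < m)] at hj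
          have hlenf := le_length_CC n hn (0 + (total.toNat + 1))
          have : j < ((total.toNat + 1 : Nat) : Int) := by omega
          omega)
    rw [show ((CC n 0).length : Int) = (0 : Int) from by simp [CC_zero]] at hB
    rw [show ((0 : Nat) : Int) = (0 : Int) from rfl, List.nil_append] at hB
    rw [hB]
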